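-- pv_equiv track=rewrite | github.com/TayLi-LXY/Health-Assistant | scripts/preprocess_kb.py | _split_by_separators
-- ===== SOURCE A (Python) =====
-- from typing import Any, Dict, Iterable, List, Tuple
--
-- def _split_by_separators(text: str, seps: List[str]) -> List[str]:
--     """递归按分隔符切分（从强到弱），避免过大块。"""
--     parts = [text]
--     for sep in seps:
--         next_parts: List[str] = []
--         for p in parts:
--             if not p:
--                 continue
--             if sep == "":
--                 next_parts.append(p)
--                 continue
--             if sep in p:
--                 next_parts.extend([x for x in p.split(sep) if x])
--             else:
--                 next_parts.append(p)
--         parts = next_parts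
--     return parts
-- ===== SOURCE B (Python) =====
-- from typing import List
--
-- def _split_by_separators(text: str, seps: List[str]) -> List[str]:
--     """Depth-first recursion over the piece hierarchy instead of a breadth-first fold."""
--     if not seps:
--         return [text]
--     sep, rest = seps[0], seps[1:]
--     if not text:
--         return []
--     if sep == "":
--         pieces = [text]
--     elif sep in text:
--         pieces = [x for x in text.split(sep) if x]
--     else:
--         pieces = [text]
--     out: List[str] = []
--     for p in pieces:
--         out.extend(_split_by_separators(p, rest))
--     return out
-- ===== Notes on version B (the rewrite author's own statement) =====
-- stated objective: alternative
-- what changed: Replaced the breadth-first fold over separators that rebuilds the whole worklist of parts at every level by a depth-first recursion on the separator list that fully splits each piece before moving to the next, concatenating the recursive results.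
import Mathlib
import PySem

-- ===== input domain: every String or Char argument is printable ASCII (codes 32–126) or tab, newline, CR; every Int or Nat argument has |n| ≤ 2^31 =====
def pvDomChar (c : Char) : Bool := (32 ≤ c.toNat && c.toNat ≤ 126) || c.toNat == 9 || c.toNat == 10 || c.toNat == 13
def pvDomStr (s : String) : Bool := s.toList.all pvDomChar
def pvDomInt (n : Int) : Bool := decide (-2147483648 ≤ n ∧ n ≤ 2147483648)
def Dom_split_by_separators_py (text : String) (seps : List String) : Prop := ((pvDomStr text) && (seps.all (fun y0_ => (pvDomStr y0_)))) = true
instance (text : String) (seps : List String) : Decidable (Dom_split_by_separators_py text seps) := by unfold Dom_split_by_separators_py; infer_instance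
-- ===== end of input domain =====

-- B replaces A's breadth-first fold over separators (rebuilding the whole parts
-- worklist at each level) by a depth-first recursion on the separator list; same values.


-- ===== PORT A =====
-- the body of A's inner 'for p in parts' loop
def pvStepA (sep : String) (acc : List String) (p : String) : List String :=
  if p = "" then acc
  else if sep = "" then acc ++ [p]
  else if PySem.Str.isIn sep p then
    acc ++ ((PySem.Str.split? p sep).getD []).filter (fun x => !(x == ""))
  else acc ++ [p]

def split_by_separators_py (text : String) (seps : List String) : List String :=
  seps.foldl (fun parts sep => parts.foldl (pvStepA sep) []) [text]

-- ===== PORT B =====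
def split_by_separators_py_alt (text : String) (seps : List String) : List String :=
  match seps with
  | [] => [text]
  | sep :: rest =>
    if text = "" then []
    else
      let pieces :=
        if sep = "" then [text]
        else if PySem.Str.isIn sep text then
          ((PySem.Str.split? text sep).getD []).filter (fun x => !(x == ""))
        else [text]
      pieces.foldl (fun out p => out ++ split_by_separators_py_alt p rest) []

-- ===== PRECONDITION & SPEC =====
def Spec_split_by_separators_py (text : String) (seps : List String) (out : List String) : Prop := out = split_by_separators_py_alt text seps
instance (text : String) (seps : List String) (out : List String) : Decidable (Spec_split_by_separators_py text seps out) := by unfold Spec_split_by_separators_py; infer_instance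

-- ===== CLAIM (what is proved, stated in full; the proofs are below) =====
def Claim_equal_split_by_separators_py : Prop := ∀ (text : String) (seps : List String), Dom_split_by_separators_py text seps → Spec_split_by_separators_py text seps (split_by_separators_py text seps)

-- ===== LEMMAS AND PROOFS =====

-- the pieces one separator level produces from one part
def pvPieces (sep p : String) : List String :=
  if p = "" then []
  else if sep = "" then [p]
  else if PySem.Str.isIn sep p then
    ((PySem.Str.split? p sep).getD []).filter (fun x => !(x == ""))
  else [p]

theorem pvStepA_eq (sep : String) (acc : List String) (p : String) :
    pvStepA sep acc p = acc ++ pvPieces sep p := by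
  unfold pvStepA pvPieces
  split_ifs <;> simp

theorem foldl_stepA (sep : String) (parts acc : List String) :
    parts.foldl (pvStepA sep) acc = acc ++ parts.flatMap (pvPieces sep) := by
  have : parts.foldl (pvStepA sep) acc
      = parts.foldl (fun a p => a ++ pvPieces sep p) acc := by
    induction parts generalizing acc with
    | nil => rfl
    | cons p ps ih => simp only [List.foldl_cons, pvStepA_eq, ih]
  rw [this, PySem.List.foldl_append_eq_flatMap]

theorem alt_cons (text sep : String) (rest : List String) :
    split_by_separators_py_alt text (sep :: rest)
      = (pvPieces sep text).flatMap (fun p => split_by_separators_py_alt p rest) := by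
  rw [split_by_separators_py_alt, pvPieces]
  by_cases h : text = ""
  · simp [h]
  · simp only [h, if_false]
    rw [PySem.List.foldl_append_eq_flatMap]
    simp

theorem main_lemma (seps : List String) (parts : List String) :
    seps.foldl (fun parts sep => parts.foldl (pvStepA sep) []) parts
      = parts.flatMap (fun p => split_by_separators_py_alt p seps) := by
  induction seps generalizing parts with
  | nil => simp [split_by_separators_py_alt]
  | cons sep rest ih =>
    simp only [List.foldl_cons]
    rw [ih, foldl_stepA]
    rw [List.nil_append, List.flatMap_assoc]
    exact List.flatMap_congr (fun p _ => (alt_cons p sep rest).symm)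

-- ===== VERDICT (by name: the statement is the Claim_ definition above) =====
theorem split_by_separators_py_spec : Claim_equal_split_by_separators_py := by
  intro text seps _
  unfold Spec_split_by_separators_py split_by_separators_py
  rw [main_lemma]
  simp
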